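-- pv_equiv track=rewrite | github.com/bartneck/swiML | bookExamples/patterns/looks-and-say/look-and-say-digits-all-terms.py | count_digits_for_all_terms
-- ===== SOURCE A (Python) =====
-- def count_digits(sequence):
--     count_1 = sequence.count('1')
--     count_2 = sequence.count('2')
--     count_3 = sequence.count('3')
--     return count_1, count_2, count_3
--
-- def look_and_say(n):
--     if n == 1:
--         return '1'
--     if n == 2:
--         return '11'
--
--     s = "11"
--     for _ in range(3, n + 1):
--         s += '$'
--         l = len(s)
--         cnt = 1
--         tmp = ""
--         for j in range(1, l):
--             if s[j] != s[j - 1]: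
--                 tmp += str(cnt + 0)
--                 tmp += s[j - 1]
--                 cnt = 1
--             else:
--                 cnt += 1
--         s = tmp
--
--     return s
--
-- def count_digits_for_all_terms(n_terms):
--     count_1_total = 0
--     count_2_total = 0
--     count_3_total = 0
--     for i in range(1, n_terms + 1):
--         sequence = look_and_say(i)
--         count_1, count_2, count_3 = count_digits(sequence)
--         count_1_total += count_1
--         count_2_total += count_2
--         count_3_total += count_3
--     return count_1_total, count_2_total, count_3_total
-- ===== SOURCE B (Python) =====
-- def count_digits_for_all_terms(n_terms):
--     t1 = t2 = t3 = 0
--     term = "1"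
--     for _ in range(n_terms):
--         nxt = ""
--         run_char = term[0]
--         run_len = 0
--         for ch in term:
--             if ch == '1':
--                 t1 += 1
--             elif ch == '2':
--                 t2 += 1
--             elif ch == '3':
--                 t3 += 1
--             if ch == run_char:
--                 run_len += 1
--             else:
--                 nxt += str(run_len) + run_char
--                 run_char = ch
--                 run_len = 1
--         term = nxt + str(run_len) + run_char
--     return t1, t2, t3
-- ===== Notes on version B (the rewrite author's own statement) =====
-- stated objective: faster
-- what changed: B keeps the current look-and-say term and advances it once per iteration with a single fused run-length scan that counts the digits 1/2/3 while emitting the next term, instead of A's regeneration of every term from scratch via look_and_say(i) followed by three separate .count passes.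
import Mathlib
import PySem

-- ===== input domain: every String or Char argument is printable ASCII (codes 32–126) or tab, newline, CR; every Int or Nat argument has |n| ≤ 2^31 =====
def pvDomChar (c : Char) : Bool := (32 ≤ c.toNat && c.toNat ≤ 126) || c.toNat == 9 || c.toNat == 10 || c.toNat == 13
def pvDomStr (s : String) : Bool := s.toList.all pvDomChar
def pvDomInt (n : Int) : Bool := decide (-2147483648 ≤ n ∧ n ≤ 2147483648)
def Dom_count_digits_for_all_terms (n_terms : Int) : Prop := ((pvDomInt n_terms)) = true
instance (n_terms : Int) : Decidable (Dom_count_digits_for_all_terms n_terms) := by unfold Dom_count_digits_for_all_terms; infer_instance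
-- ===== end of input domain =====

-- B generates each look-and-say term once, incrementally, with a fused run-length scan that
-- counts digits while emitting the next term, instead of A's per-term regeneration from scratch
-- plus three .count passes (objective: faster).

-- ===== PORT A =====
-- count_digits(sequence): the three .count calls
def pvCountDigits (sequence : List Char) : Int × Int × Int :=
  ((PySem.Chars.count sequence ['1'] : Int),
   (PySem.Chars.count sequence ['2'] : Int),
   (PySem.Chars.count sequence ['3'] : Int))

-- the body of A's inner "for j in range(1, l)" loop; state = (cnt, tmp).
-- The string s is held as Array Char (Python indexing is O(1)); j and j-1 are always
-- in range 1 ≤ j-1 < j < len(s) here, so .toNat and .getD are exact for Python's s[j].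
def pvABody (s : Array Char) (st : Int × Array Char) (j : Int) : Int × Array Char :=
  if s.getD j.toNat ' ' ≠ s.getD (j - 1).toNat ' ' then
    (1, (st.2 ++ (PySem.Int.toChars (st.1 + 0)).toArray).push (s.getD (j - 1).toNat ' '))
  else
    (st.1 + 1, st.2)

-- the body of A's outer "for _ in range(3, n + 1)" loop: s += '$'; scan; s = tmp
def pvLasStep (s0 : List Char) : List Char :=
  -- s = s0 + '$'; l = len(s); inner scan; result tmp
  ((PySem.List.pyRange 1 (((s0 ++ ['$']).toArray.size : Int))).foldl
    (pvABody (s0 ++ ['$']).toArray) (1, #[])).2.toList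

def pvLookAndSay (n : Int) : List Char :=
  if n = 1 then ['1']
  else if n = 2 then ['1', '1']
  else (PySem.List.pyRange 3 (n + 1)).foldl (fun s _ => pvLasStep s) ['1', '1']

def pvAOuter (t : Int × Int × Int) (i : Int) : Int × Int × Int :=
  let c := pvCountDigits (pvLookAndSay i)
  (t.1 + c.1, t.2.1 + c.2.1, t.2.2 + c.2.2)

def count_digits_for_all_terms (n_terms : Int) : Int × Int × Int :=
  (PySem.List.pyRange 1 (n_terms + 1)).foldl pvAOuter (0, 0, 0)

-- ===== PORT B =====
-- the body of B's "for ch in term" loop; state = ((t1,t2,t3), nxt, run_char, run_len)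
-- nxt is held as Array Char (Python's str += is amortized O(1))
def pvAltInner (q : (Int × Int × Int) × Array Char × Char × Int) (ch : Char) :
    (Int × Int × Int) × Array Char × Char × Int :=
  let t := q.1
  let t := if ch = '1' then (t.1 + 1, t.2.1, t.2.2)
    else if ch = '2' then (t.1, t.2.1 + 1, t.2.2)
    else if ch = '3' then (t.1, t.2.1, t.2.2 + 1)
    else t
  if ch = q.2.2.1 then (t, q.2.1, q.2.2.1, q.2.2.2 + 1)
  else (t, (q.2.1 ++ (PySem.Int.toChars q.2.2.2).toArray).push q.2.2.1, ch, 1)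

-- one iteration of B's outer loop: scan term, then flush the last run into the new term
def pvAltStep (st : (Int × Int × Int) × List Char) : (Int × Int × Int) × List Char :=
  let term := st.2
  let q := term.foldl pvAltInner (st.1, (#[] : Array Char), PySem.List.pyGetD term 0 ' ', (0 : Int))
  (q.1, ((q.2.1 ++ (PySem.Int.toChars q.2.2.2).toArray).push q.2.2.1).toList)

def count_digits_for_all_terms_alt (n_terms : Int) : Int × Int × Int :=
  ((PySem.List.pyRange 0 n_terms).foldl (fun st _ => pvAltStep st) ((0, 0, 0), ['1'])).1

-- ===== PRECONDITION & SPEC =====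
def Spec_count_digits_for_all_terms (n_terms : Int) (out : Int × Int × Int) : Prop := out = count_digits_for_all_terms_alt n_terms
instance (n_terms : Int) (out : Int × Int × Int) : Decidable (Spec_count_digits_for_all_terms n_terms out) := by unfold Spec_count_digits_for_all_terms; infer_instance

-- ===== CLAIM (what is proved, stated in full; the proofs are below) =====
def Claim_equal_count_digits_for_all_terms : Prop := ∀ (n_terms : Int), Dom_count_digits_for_all_terms n_terms → Spec_count_digits_for_all_terms n_terms (count_digits_for_all_terms n_terms)

-- ===== LEMMAS AND PROOFS =====

-- proof-only helpers ------------------------------------------------------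

-- A's inner loop as a structural recursion over the scanned suffix
def pvGo (prev : Char) (cnt : Int) (tmp : List Char) : List Char → Int × List Char
  | [] => (cnt, tmp)
  | c :: cs =>
    if c ≠ prev then pvGo c 1 (tmp ++ PySem.Int.toChars (cnt + 0) ++ [prev]) cs
    else pvGo prev (cnt + 1) tmp cs

-- the run-scan part of B's inner body (no counting); state = (nxt, run_char, run_len)
def pvScanStep (st : List Char × Char × Int) (ch : Char) : List Char × Char × Int :=
  if ch = st.2.1 then (st.1, st.2.1, st.2.2 + 1)
  else (st.1 ++ PySem.Int.toChars st.2.2 ++ [st.2.1], ch, 1)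

def pvFlush (st : List Char × Char × Int) : List Char :=
  st.1 ++ PySem.Int.toChars st.2.2 ++ [st.2.1]

-- the counting part of B's inner body
def pvCnt (t : Int × Int × Int) (ch : Char) : Int × Int × Int :=
  if ch = '1' then (t.1 + 1, t.2.1, t.2.2)
  else if ch = '2' then (t.1, t.2.1 + 1, t.2.2)
  else if ch = '3' then (t.1, t.2.1, t.2.2 + 1)
  else t

-- basic facts -------------------------------------------------------------

lemma pvRange_nil {a b : Int} (h : b ≤ a) : PySem.List.pyRange a b = [] := by
  rw [PySem.List.pyRange_one]
  have : (b - a).toNat = 0 := by omega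
  simp [this]

lemma pvArrGetD (l : List Char) (n : Nat) (d : Char) : l.toArray.getD n d = l.getD n d := by
  by_cases h : n < l.length
  · simp [Array.getD, h]
  · simp [Array.getD, h, List.getD_eq_getElem?_getD]

lemma pvArrPush (l l2 : List Char) (c : Char) :
    (l.toArray ++ l2.toArray).push c = (l ++ l2 ++ [c]).toArray := by simp

lemma pvDigitChar_ne (m : Nat) : Nat.digitChar m ≠ '$' := by
  rcases Nat.lt_or_ge m 16 with h | h
  · interval_cases m <;> decide
  · have star : Nat.digitChar m = '*' := by
      unfold Nat.digitChar
      rw [if_neg (by omega), if_neg (by omega), if_neg (by omega), if_neg (by omega),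
        if_neg (by omega), if_neg (by omega), if_neg (by omega), if_neg (by omega),
        if_neg (by omega), if_neg (by omega), if_neg (by omega), if_neg (by omega),
        if_neg (by omega), if_neg (by omega), if_neg (by omega), if_neg (by omega)]
    rw [star]
    decide

lemma pvToDigitsCore_ne (f : Nat) : ∀ (n : Nat) (ds : List Char), '$' ∉ ds →
    '$' ∉ Nat.toDigitsCore 10 f n ds := by
  induction f with
  | zero => intro n ds h; simpa [Nat.toDigitsCore] using h
  | succ f ih =>
    intro n ds h
    rw [Nat.toDigitsCore]
    have hd : '$' ∉ (n % 10).digitChar :: ds := by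
      intro hc
      rcases List.mem_cons.mp hc with hc | hc
      · exact pvDigitChar_ne _ hc.symm
      · exact h hc
    split
    · exact hd
    · exact ih _ _ hd

lemma pvToChars_ne (n : Int) : '$' ∉ PySem.Int.toChars n := by
  unfold PySem.Int.toChars
  split
  · intro h
    rcases List.mem_cons.mp h with h | h
    · exact absurd h.symm (by decide)
    · exact pvToDigitsCore_ne _ _ _ (by simp) h
  · exact pvToDigitsCore_ne _ _ _ (by simp)

lemma pvCount_go_single (f : Nat) : ∀ (l : List Char) (acc : Nat) (c : Char), l.length ≤ f →
    PySem.Chars.count.go [c] f l acc = acc + l.count c := by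
  induction f with
  | zero =>
    intro l acc c h
    have : l = [] := List.length_eq_zero_iff.mp (Nat.le_zero.mp h)
    subst this
    simp [PySem.Chars.count.go]
  | succ f ih =>
    intro l acc c h
    cases l with
    | nil => simp [PySem.Chars.count.go]
    | cons x xs =>
      have hlen : xs.length ≤ f := by simpa using Nat.lt_succ_iff.mp (by simpa using h)
      rw [PySem.Chars.count.go]
      by_cases hx : c = x
      · subst hx
        have hp : [c].isPrefixOf (c :: xs) = true := by simp [List.isPrefixOf]
        rw [if_pos hp]
        have hdrop : List.drop ([c] : List Char).length (c :: xs) = xs := by simp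
        rw [hdrop, ih xs (acc + 1) c hlen, List.count_cons]
        simp
        omega
      · have hp : [c].isPrefixOf (x :: xs) = false := by
          simp [List.isPrefixOf]
          exact hx
        rw [if_neg (by simp [hp]), ih xs acc c hlen, List.count_cons]
        have : (x == c) = false := by simp; exact fun hc => hx hc.symm
        simp [this]

lemma pvCount_single (s : List Char) (c : Char) :
    PySem.Chars.count s [c] = s.count c := by
  have : ([c] : List Char).isEmpty = false := by simp
  simp only [PySem.Chars.count, this]
  simpa using pvCount_go_single s.length s 0 c le_rfl

-- A's indexed inner loop equals the structural recursion pvGo ---------------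

lemma pvA_loop_go (t : List Char) (m : Nat) : ∀ (k : Nat) (cnt : Int) (tmpl : List Char),
    k < t.length → t.length - k ≤ m →
    (PySem.List.pyRange ((k : Int) + 1) (t.length : Int)).foldl (pvABody t.toArray) (cnt, tmpl.toArray)
      = ((pvGo (t.getD k ' ') cnt tmpl (t.drop (k + 1))).1,
         (pvGo (t.getD k ' ') cnt tmpl (t.drop (k + 1))).2.toArray) := by
  induction m with
  | zero => intro k cnt tmpl hk hm; omega
  | succ m ih =>
    intro k cnt tmpl hk hm
    by_cases hk1 : k + 1 < t.length
    · have hrange : PySem.List.pyRange ((k : Int) + 1) (t.length : Int)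
          = ((k : Int) + 1) :: PySem.List.pyRange ((k : Int) + 1 + 1) (t.length : Int) :=
        PySem.List.pyRange_one_cons (by exact_mod_cast hk1)
      rw [hrange, List.foldl_cons, List.drop_eq_getElem_cons hk1]
      have hget : t.getD (k + 1) ' ' = t[k + 1] := List.getD_eq_getElem t ' ' hk1
      have e1n : ((k : Int) + 1).toNat = k + 1 := by omega
      have e2n : ((k : Int) + 1 - 1).toNat = k := by omega
      have hbody : pvABody t.toArray (cnt, tmpl.toArray) ((k : Int) + 1)
          = if t[k + 1] ≠ t.getD k ' '
            then (1, (tmpl ++ PySem.Int.toChars (cnt + 0) ++ [t.getD k ' ']).toArray)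
            else (cnt + 1, tmpl.toArray) := by
        simp only [pvABody, e1n, e2n, pvArrGetD, pvArrPush, hget]
      rw [hbody]
      have hgo : pvGo (t.getD k ' ') cnt tmpl (t[k + 1] :: t.drop (k + 1 + 1))
          = if t[k + 1] ≠ t.getD k ' '
            then pvGo t[k + 1] 1 (tmpl ++ PySem.Int.toChars (cnt + 0) ++ [t.getD k ' ']) (t.drop (k + 1 + 1))
            else pvGo (t.getD k ' ') (cnt + 1) tmpl (t.drop (k + 1 + 1)) := by
        rw [pvGo]
      rw [hgo]
      have e3 : ((k : Int) + 1 + 1) = ((k + 1 : Nat) : Int) + 1 := by push_cast; ring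
      split_ifs with hne
      · rw [e3, ← hget]
        exact ih (k + 1) 1 _ hk1 (by omega)
      · rw [e3, ih (k + 1) (cnt + 1) tmpl hk1 (by omega), hget, not_ne_iff.mp hne]
    · have hend : t.length ≤ k + 1 := by omega
      have hnil : PySem.List.pyRange ((k : Int) + 1) (t.length : Int) = [] :=
        pvRange_nil (by exact_mod_cast hend)
      rw [hnil, List.drop_eq_nil_of_le hend]
      simp [pvGo]

-- pvGo over the '$'-terminated list equals B's run scan plus final flush ----

lemma pvGo_sentinel : ∀ (cs : List Char) (prev : Char) (cnt : Int) (tmp : List Char),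
    '$' ∉ cs → prev ≠ '$' →
    (pvGo prev cnt tmp (cs ++ ['$'])).2 = pvFlush (cs.foldl pvScanStep (tmp, prev, cnt)) := by
  intro cs
  induction cs with
  | nil =>
    intro prev cnt tmp _ hprev
    simp only [List.nil_append, List.foldl_nil]
    rw [pvGo, if_pos (fun h => hprev h.symm), pvGo]
    simp [pvFlush]
  | cons c cs ih =>
    intro prev cnt tmp hcs hprev
    have hc : c ≠ '$' := fun h => hcs (by simp [h])
    have hcs' : '$' ∉ cs := fun h => hcs (by simp [h])
    simp only [List.cons_append, List.foldl_cons]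
    rw [pvGo]
    by_cases he : c = prev
    · subst he
      rw [if_neg (by simp)]
      have hs : pvScanStep (tmp, c, cnt) c = (tmp, c, cnt + 1) := by simp [pvScanStep]
      rw [hs]
      exact ih c (cnt + 1) tmp hcs' hc
    · rw [if_pos he]
      have hs : pvScanStep (tmp, prev, cnt) c
          = (tmp ++ PySem.Int.toChars cnt ++ [prev], c, 1) := by
        simp [pvScanStep, he]
      rw [hs]
      have := ih c 1 (tmp ++ PySem.Int.toChars cnt ++ [prev]) hcs' hc
      simpa using this

-- A's step equals B's fused scan-and-flush on a good term -------------------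

lemma pvLasStep_eq (c : Char) (rest : List Char) (hc : c ≠ '$') (hrest : '$' ∉ rest) :
    pvLasStep (c :: rest) = pvFlush (rest.foldl pvScanStep ([], c, 1)) := by
  unfold pvLasStep
  have hsz : (((c :: rest) ++ ['$']).toArray.size : Int) = (((c :: rest) ++ ['$']).length : Int) := by
    simp
  have hmt : (#[] : Array Char) = ([] : List Char).toArray := rfl
  rw [hsz, hmt]
  have h0 : (0 : Nat) < ((c :: rest) ++ ['$']).length := by simp
  have hmain := pvA_loop_go ((c :: rest) ++ ['$']) ((c :: rest) ++ ['$']).length 0 1 [] h0 le_rfl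
  simp only [Int.natCast_zero, zero_add] at hmain
  have hd : ((c :: rest) ++ ['$']).getD 0 ' ' = c := by simp
  have hdrop : ((c :: rest) ++ ['$']).drop 1 = rest ++ ['$'] := by simp
  rw [hmain, hd, hdrop]
  exact pvGo_sentinel rest c 1 [] hrest hc

-- B's inner loop splits into digit counting and the pure run scan -----------

lemma pvAltInner_eq (t : Int × Int × Int) (nl : List Char) (rc : Char) (rl : Int) (ch : Char) :
    pvAltInner (t, (nl.toArray, rc, rl)) ch
      = (pvCnt t ch, ((pvScanStep (nl, rc, rl) ch).1.toArray,
          (pvScanStep (nl, rc, rl) ch).2.1, (pvScanStep (nl, rc, rl) ch).2.2)) := by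
  unfold pvAltInner pvCnt pvScanStep
  by_cases h : ch = rc
  · simp [h]
  · simp [h]

lemma pvAltFold (cs : List Char) : ∀ (t : Int × Int × Int) (nl : List Char) (rc : Char) (rl : Int),
    cs.foldl pvAltInner (t, (nl.toArray, rc, rl))
      = ((t.1 + (cs.count '1' : Int), t.2.1 + (cs.count '2' : Int), t.2.2 + (cs.count '3' : Int)),
         ((cs.foldl pvScanStep (nl, rc, rl)).1.toArray,
          (cs.foldl pvScanStep (nl, rc, rl)).2.1, (cs.foldl pvScanStep (nl, rc, rl)).2.2)) := by
  induction cs with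
  | nil => intro t nl rc rl; simp
  | cons c cs ih =>
    intro t nl rc rl
    simp only [List.foldl_cons, pvAltInner_eq, List.count_cons]
    rw [ih (pvCnt t c) (pvScanStep (nl, rc, rl) c).1 (pvScanStep (nl, rc, rl) c).2.1
      (pvScanStep (nl, rc, rl) c).2.2]
    simp only [Prod.mk.eta, Prod.mk.injEq]
    refine ⟨?_, trivial⟩
    by_cases h1 : c = '1'
    · subst h1; simp [pvCnt]; omega
    · by_cases h2 : c = '2'
      · subst h2; simp [pvCnt]; omega
      · by_cases h3 : c = '3'
        · subst h3; simp [pvCnt]; omega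
        · simp [pvCnt, h1, h2, h3]

-- '$' never appears in any term --------------------------------------------

def pvGood (s : List Char) : Prop := s ≠ [] ∧ '$' ∉ s

lemma pvScan_good (cs : List Char) : ∀ (st : List Char × Char × Int),
    '$' ∉ cs → '$' ∉ st.1 → st.2.1 ≠ '$' →
    '$' ∉ (cs.foldl pvScanStep st).1 ∧ (cs.foldl pvScanStep st).2.1 ≠ '$' := by
  induction cs with
  | nil => intro st _ h1 h2; exact ⟨h1, h2⟩
  | cons c cs ih =>
    intro st hcs h1 h2
    have hc : c ≠ '$' := fun h => hcs (by simp [h])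
    have hcs' : '$' ∉ cs := fun h => hcs (by simp [h])
    simp only [List.foldl_cons]
    unfold pvScanStep
    by_cases he : c = st.2.1
    · rw [if_pos he]; exact ih _ hcs' h1 h2
    · rw [if_neg he]
      refine ih _ hcs' ?_ hc
      intro h
      rcases List.mem_append.mp h with h | h
      · rcases List.mem_append.mp h with h | h
        · exact h1 h
        · exact pvToChars_ne _ h
      · simp at h; exact h2 h.symm

lemma pvFlush_good (st : List Char × Char × Int) (h1 : '$' ∉ st.1) (h2 : st.2.1 ≠ '$') :
    pvGood (pvFlush st) := by
  constructor
  · simp [pvFlush]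
  · intro h
    rcases List.mem_append.mp h with h | h
    · rcases List.mem_append.mp h with h | h
      · exact h1 h
      · exact pvToChars_ne _ h
    · simp at h; exact h2 h.symm

-- look_and_say facts --------------------------------------------------------

def pvIter (n : Int) : List Char :=
  (PySem.List.pyRange 3 n).foldl (fun s _ => pvLasStep s) ['1', '1']

lemma pvLas_eq_iter (n : Int) (h : 2 ≤ n) : pvLookAndSay n = pvIter (n + 1) := by
  by_cases h2 : n = 2
  · subst h2
    unfold pvLookAndSay pvIter
    rw [pvRange_nil (by norm_num)]
    simp
  · unfold pvLookAndSay pvIter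
    rw [if_neg (by omega), if_neg h2]

lemma pvLas_succ (i : Nat) :
    pvLookAndSay ((i : Int) + 2) = pvLasStep (pvLookAndSay ((i : Int) + 1)) := by
  cases i with
  | zero => decide
  | succ j =>
    have e : ((j + 1 : Nat) : Int) = (j : Int) + 1 := by push_cast; ring_nf
    rw [e]
    have h1 : (2 : Int) ≤ (j : Int) + 1 + 2 := by omega
    have h2 : (2 : Int) ≤ (j : Int) + 1 + 1 := by omega
    rw [pvLas_eq_iter _ h1, pvLas_eq_iter _ h2]
    unfold pvIter
    rw [show (j : Int) + 1 + 2 + 1 = ((j : Int) + 1 + 1 + 1) + 1 by ring,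
      PySem.List.pyRange_one_succ_right (by omega), List.foldl_append]
    simp

lemma pvLas_good (N : Nat) : pvGood (pvLookAndSay ((N : Int) + 1)) := by
  induction N with
  | zero => refine ⟨by simp [pvLookAndSay], by simp [pvLookAndSay]⟩
  | succ M ih =>
    have e : ((M + 1 : Nat) : Int) + 1 = (M : Int) + 2 := by push_cast; ring
    rw [e, pvLas_succ M]
    obtain ⟨hne, hmem⟩ := ih
    obtain ⟨c, rest, hcr⟩ : ∃ c rest, pvLookAndSay ((M : Int) + 1) = c :: rest := by
      cases h : pvLookAndSay ((M : Int) + 1) with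
      | nil => exact absurd h hne
      | cons c rest => exact ⟨c, rest, rfl⟩
    rw [hcr] at hmem ⊢
    have hc : c ≠ '$' := fun h => hmem (by simp [h])
    have hrest : '$' ∉ rest := fun h => hmem (by simp [h])
    rw [pvLasStep_eq c rest hc hrest]
    have := pvScan_good rest ([], c, 1) hrest (by simp) hc
    exact pvFlush_good _ this.1 this.2

-- the main loop invariant ---------------------------------------------------

lemma pvMain (N : Nat) :
    (PySem.List.pyRange 0 (N : Int)).foldl (fun st _ => pvAltStep st) ((0, 0, 0), ['1'])
      = ((PySem.List.pyRange 1 ((N : Int) + 1)).foldl pvAOuter (0, 0, 0),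
         pvLookAndSay ((N : Int) + 1)) := by
  induction N with
  | zero =>
    rw [pvRange_nil (by norm_num), pvRange_nil (by norm_num)]
    simp [pvLookAndSay]
  | succ M ih =>
    have e0 : ((M + 1 : Nat) : Int) = (M : Int) + 1 := by push_cast; ring
    rw [e0, PySem.List.pyRange_one_succ_right (by omega),
      show (M : Int) + 1 + 1 = ((M : Int) + 1) + 1 by ring,
      PySem.List.pyRange_one_succ_right (by omega),
      List.foldl_append, List.foldl_append, ih]
    simp only [List.foldl_cons, List.foldl_nil]
    -- one combined step
    obtain ⟨hne, hmem⟩ := pvLas_good M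
    obtain ⟨c, rest, hcr⟩ : ∃ c rest, pvLookAndSay ((M : Int) + 1) = c :: rest := by
      cases h : pvLookAndSay ((M : Int) + 1) with
      | nil => exact absurd h hne
      | cons c rest => exact ⟨c, rest, rfl⟩
    have hc : c ≠ '$' := by rw [hcr] at hmem; exact fun h => hmem (by simp [h])
    have hrest : '$' ∉ rest := by rw [hcr] at hmem; exact fun h => hmem (by simp [h])
    unfold pvAltStep
    simp only
    rw [hcr]
    have hget : PySem.List.pyGetD (c :: rest) 0 ' ' = c := by
      have h0 : ((0 : Nat) : Int) = (0 : Int) := rfl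
      rw [← h0, PySem.List.pyGetD_natCast]
      rfl
    have hmt : (#[] : Array Char) = ([] : List Char).toArray := rfl
    rw [hget, hmt, pvAltFold]
    refine Prod.ext ?_ ?_
    · -- counts component
      unfold pvAOuter pvCountDigits
      rw [hcr]
      simp [pvCount_single]
    · -- term component
      rw [show ((M : Int) + 1) + 1 = (M : Int) + 2 by ring, pvLas_succ M, hcr,
        pvLasStep_eq c rest hc hrest]
      have hscan : (c :: rest).foldl pvScanStep ([], c, 0) = rest.foldl pvScanStep ([], c, 1) := by
        simp [pvScanStep]
      simp only [hscan, pvArrPush, pvFlush]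

-- ===== VERDICT (by name: the statement is the Claim_ definition above) =====
theorem count_digits_for_all_terms_spec : Claim_equal_count_digits_for_all_terms := by
  intro n _
  unfold Spec_count_digits_for_all_terms count_digits_for_all_terms count_digits_for_all_terms_alt
  by_cases hn : 0 ≤ n
  · have : n = (n.toNat : Int) := (Int.toNat_of_nonneg hn).symm
    rw [this, pvMain n.toNat]
  · rw [pvRange_nil (by omega), pvRange_nil (by omega)]
    simp
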